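-- pv_equiv track=rewrite | github.com/Mimijackz/Advent-of-code-2023 | 11/11-2.py | ExpandColumns
-- ===== SOURCE A (Python) =====
-- def ExpandColumns(lines, positions):
--     newpositions = positions.copy()
--     expandingcolumns = []
--     for i in range(len(lines[0])):
--         isempty = True
--         for row in range(len(lines)):
--             char = lines[row][i]
--             if char == "#":
--                 isempty = False
--         if isempty:
--             expandingcolumns.append(i)
--
--     offset = 0
--     for i in range(len(expandingcolumns)):
--         index = expandingcolumns[i] + offset
--         for position in newpositions:
--             if position[0] > index:
--                 position[0] += 999999
--         offset += 999999
--
--     return newpositions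
-- ===== SOURCE B (Python) =====
-- def ExpandColumns(lines, positions):
--     width = len(lines[0])
--     empty = [all(line[i] != "#" for line in lines) for i in range(width)]
--     # shift[j] = 999999 * (number of empty columns with index < j), 0 <= j <= width
--     shift = [0]
--     acc = 0
--     for e in empty:
--         if e:
--             acc += 999999
--         shift.append(acc)
--     for p in positions:
--         x = p[0]
--         p[0] = x + (shift[width] if x > width else shift[x] if x > 0 else 0)
--     return positions
-- ===== Notes on version B (the rewrite author's own statement) =====
-- stated objective: alternative
-- what changed: A sweeps every empty column over every position while accumulating a running offset; B builds one prefix-sum shift table over the columns and adds shift[clamp(x)] to each position's x, removing the per-empty-column sweep over positions.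
-- outside the precondition, e.g. on ExpandColumns(['#'], [[]]): A returns [[]], B raises IndexError
import Mathlib
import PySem

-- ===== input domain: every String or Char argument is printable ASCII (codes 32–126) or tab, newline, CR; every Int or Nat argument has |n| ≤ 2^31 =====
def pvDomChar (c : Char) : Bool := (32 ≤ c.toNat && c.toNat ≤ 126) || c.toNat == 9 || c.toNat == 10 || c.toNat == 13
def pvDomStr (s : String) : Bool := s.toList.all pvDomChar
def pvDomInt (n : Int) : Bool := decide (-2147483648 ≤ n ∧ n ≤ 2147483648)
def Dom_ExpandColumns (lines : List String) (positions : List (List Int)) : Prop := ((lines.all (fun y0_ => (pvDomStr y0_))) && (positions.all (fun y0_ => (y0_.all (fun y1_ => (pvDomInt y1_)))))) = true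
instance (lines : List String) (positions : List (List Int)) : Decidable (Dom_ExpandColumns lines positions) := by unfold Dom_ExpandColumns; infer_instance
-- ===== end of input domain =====

-- B replaces A's per-empty-column sweep over all positions (with a running offset) by one
-- prefix-sum shift table indexed by a clamped x-coordinate (alternative algorithm, same measured cost).
-- Note: both Pythons mutate the inner position lists in place; equivalence here is about the return value.


-- ===== PORT A =====
-- inner row loop: 'for row in range(len(lines)): char = lines[row][i]; if char == "#": isempty = False'
def pvColEmptyFold (lines : List String) (i : Nat) : Bool :=
  lines.foldl (fun isempty row =>
    if PySem.Str.pyGet? row (i : Int) == some '#' then false else isempty) true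

-- one position under 'if position[0] > index: position[0] += 999999' (position[0] on [] raises in Python; Pre_ excludes it)
def pvUpd (index : Int) (position : List Int) : List Int :=
  match position with
  | x :: rest => if x > index then (x + 999999) :: rest else x :: rest
  | [] => []

-- one iteration of 'for i in range(len(expandingcolumns))': state = (newpositions, offset)
def pvStepAll (st : List (List Int) × Int) (c : Nat) : List (List Int) × Int :=
  (st.1.map (pvUpd ((c : Int) + st.2)), st.2 + 999999)

def ExpandColumns (lines : List String) (positions : List (List Int)) : List (List Int) :=
  let width := (lines.headD "").toList.length   -- len(lines[0]); lines = [] raises, excluded by Pre_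
  let expandingcolumns := (List.range width).foldl
    (fun acc i => if pvColEmptyFold lines i then acc ++ [i] else acc) []
  (expandingcolumns.foldl pvStepAll (positions, 0)).1

-- ===== PORT B =====
def pvColEmptyAll (lines : List String) (i : Nat) : Bool :=
  lines.all (fun line => PySem.Str.pyGet? line (i : Int) != some '#')

-- one iteration of B's prefix-sum loop: state = (shift, acc)
def pvShiftStep (st : List Int × Int) (e : Bool) : List Int × Int :=
  let acc := st.2 + (if e then 999999 else 0)
  (st.1 ++ [acc], acc)

def ExpandColumns_alt (lines : List String) (positions : List (List Int)) : List (List Int) :=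
  let width := (lines.headD "").toList.length
  let empty := (List.range width).map (pvColEmptyAll lines)
  let shift := (empty.foldl pvShiftStep ([0], 0)).1
  -- 'shift[width]' / 'shift[x]': the selected index is always in range (0 ≤ x ≤ width, len shift = width+1), so getD is exact
  positions.map (fun p => match p with
    | x :: rest => (x + (if x > (width : Int) then shift.getD width 0
                         else if x > 0 then shift.getD x.toNat 0 else 0)) :: rest
    | [] => [])

-- ===== PRECONDITION & SPEC =====
-- Python A raises IndexError when lines is empty or some row is shorter than lines[0].
-- The last clause also excludes empty inner position lists on which A still RETURNS when there is no
-- empty column (e.g. (['#'], [[]]) → A returns [[]]): B (position[0] read unconditionally) raises there.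
def Pre_ExpandColumns (lines : List String) (positions : List (List Int)) : Prop :=
  lines ≠ [] ∧ (∀ row ∈ lines, (lines.headD "").toList.length ≤ row.toList.length) ∧
  (∀ p ∈ positions, p ≠ [])
instance (lines : List String) (positions : List (List Int)) : Decidable (Pre_ExpandColumns lines positions) := by unfold Pre_ExpandColumns; infer_instance

def pvWitness_ExpandColumns : List String × List (List Int) := (["#.#", "..."], [[2, 0], [-1]])

def Spec_ExpandColumns (lines : List String) (positions : List (List Int)) (out : List (List Int)) : Prop := out = ExpandColumns_alt lines positions
instance (lines : List String) (positions : List (List Int)) (out : List (List Int)) : Decidable (Spec_ExpandColumns lines positions out) := by unfold Spec_ExpandColumns; infer_instance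

-- ===== CLAIM (what is proved, stated in full; the proofs are below) =====
def Claim_equal_ExpandColumns : Prop := ∀ (lines : List String) (positions : List (List Int)), Dom_ExpandColumns lines positions → Pre_ExpandColumns lines positions → Spec_ExpandColumns lines positions (ExpandColumns lines positions)

-- ===== LEMMAS AND PROOFS =====

-- the scalar trace of A's inner update on one x-coordinate: state = (value, offset)
def pvStepV (st : Int × Int) (c : Nat) : Int × Int :=
  ((if st.1 > (c : Int) + st.2 then st.1 + 999999 else st.1), st.2 + 999999)

-- per-position trace of A's second loop
def pvStep1 (st : List Int × Int) (c : Nat) : List Int × Int :=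
  (pvUpd ((c : Int) + st.2) st.1, st.2 + 999999)

theorem foldl_if_false (L : List String) (P : String → Bool) (b : Bool) :
    L.foldl (fun ac r => if P r then false else ac) b = (b && L.all (fun r => !P r)) := by
  induction L generalizing b with
  | nil => simp
  | cons h t ih => simp only [List.foldl_cons, List.all_cons, ih]; cases hP : P h <;> simp

theorem colEmpty_eq (lines : List String) (i : Nat) :
    pvColEmptyFold lines i = pvColEmptyAll lines i := by
  unfold pvColEmptyFold pvColEmptyAll
  rw [foldl_if_false]
  simp [bne]

theorem foldAll_eq (cs : List Nat) (ps : List (List Int)) (o : Int) :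
    (cs.foldl pvStepAll (ps, o)).1 = ps.map (fun p => (cs.foldl pvStep1 (p, o)).1) := by
  induction cs generalizing ps o with
  | nil => simp
  | cons c t ih =>
      simp only [List.foldl_cons, pvStepAll, pvStep1, ih, List.map_map]
      rfl

theorem step1_nil (cs : List Nat) (o : Int) : (cs.foldl pvStep1 ([], o)).1 = [] := by
  induction cs generalizing o with
  | nil => rfl
  | cons c t ih => simp only [List.foldl_cons, pvStep1, pvUpd]; exact ih _

theorem step1_cons (cs : List Nat) (x : Int) (rest : List Int) (o : Int) :
    (cs.foldl pvStep1 (x :: rest, o)).1 = (cs.foldl pvStepV (x, o)).1 :: rest := by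
  induction cs generalizing x o with
  | nil => rfl
  | cons c t ih =>
      simp only [List.foldl_cons, pvStep1, pvStepV, pvUpd]
      split <;> exact ih _ _

theorem runV_eq (cs : List Nat) (hs : cs.Pairwise (· < ·)) (v o : Int) :
    (cs.foldl pvStepV (v, o)).1 = v + 999999 * (cs.countP (fun c : Nat => decide ((c : Int) < v - o)) : Int) := by
  induction cs generalizing v o with
  | nil => simp
  | cons c t ih =>
      rcases List.pairwise_cons.mp hs with ⟨hc, ht⟩
      simp only [List.foldl_cons, pvStepV]
      by_cases hv : v > (c : Int) + o
      · rw [if_pos hv, ih ht]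
        have harg : v + 999999 - (o + 999999) = v - o := by ring
        simp only [harg, List.countP_cons]
        have hcv : decide ((c : Int) < v - o) = true := by simp; omega
        rw [hcv]
        norm_num
        push_cast
        ring
      · rw [if_neg hv, ih ht]
        have h0 : t.countP (fun c' : Nat => decide ((c' : Int) < v - (o + 999999))) = 0 := by
          rw [List.countP_eq_zero]
          intro a ha
          have := hc a ha
          simp only [decide_eq_true_eq]
          omega
        have h1 : (c :: t).countP (fun c' : Nat => decide ((c' : Int) < v - o)) = 0 := by
          rw [List.countP_eq_zero]
          intro a ha
          simp only [decide_eq_true_eq]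
          rcases List.mem_cons.mp ha with rfl | ha'
          · omega
          · have := hc a ha'; omega
        rw [h0, h1]

-- B's prefix-sum table, characterised
theorem shift_spec (w : Nat) (P : Nat → Bool) :
    ((List.range w).map P).foldl pvShiftStep ([0], 0) =
      ((List.range (w + 1)).map (fun j => 999999 * (((List.range j).filter P).length : Int)),
       999999 * (((List.range w).filter P).length : Int)) := by
  induction w with
  | zero => simp [List.range_succ]
  | succ n ih =>
      conv_lhs => rw [List.range_succ, List.map_append, List.foldl_append]
      rw [ih]
      have hF : (((List.range (n + 1)).filter P).length : Int)
          = ((List.range n).filter P).length + (if P n then 1 else 0) := by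
        rw [List.range_succ, List.filter_append]
        cases hP : P n <;> simp [hP]
      simp only [pvShiftStep, List.map_cons, List.map_nil, List.foldl_cons, List.foldl_nil]
      rw [Prod.mk.injEq]
      constructor
      · conv_rhs => rw [List.range_succ, List.map_append]
        simp only [List.map_cons, List.map_nil]
        congr 1
        simp only [hF]
        cases hP : P n <;> simp [hP] <;> ring
      · simp only [hF]
        cases hP : P n <;> simp [hP] <;> ring

theorem filter_lt_range (w j : Nat) (hj : j ≤ w) :
    (List.range w).filter (fun c => decide (c < j)) = List.range j := by
  induction w with
  | zero => interval_cases j; simp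
  | succ n ih =>
      by_cases hjn : j ≤ n
      · rw [List.range_succ, List.filter_append, ih hjn]
        simp; omega
      · have : j = n + 1 := by omega
        subst this
        rw [List.filter_eq_self]
        intro a ha
        simp only [decide_eq_true_eq]
        exact List.mem_range.mp ha

theorem countP_filter_range (w j : Nat) (P : Nat → Bool) (hj : j ≤ w) :
    ((List.range w).filter P).countP (fun c => decide (c < j))
      = ((List.range j).filter P).length := by
  rw [List.countP_eq_length_filter, List.filter_comm, filter_lt_range w j hj]

theorem ExpandColumns_spec : Claim_equal_ExpandColumns := by
  intro lines positions _hdom _hpre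
  unfold Spec_ExpandColumns ExpandColumns ExpandColumns_alt
  dsimp only
  set w := (lines.headD "").toList.length with hw
  have hP : ∀ i, pvColEmptyFold lines i = pvColEmptyAll lines i := colEmpty_eq lines
  have hcols : (List.range w).foldl
      (fun acc i => if pvColEmptyFold lines i then acc ++ [i] else acc) ([] : List Nat)
      = (List.range w).filter (pvColEmptyAll lines) := by
    have := PySem.List.foldl_append_if_eq_filter (pvColEmptyFold lines) (List.range w) ([] : List Nat)
    simp only [hP] at this ⊢
    rw [this, List.nil_append]
    exact List.filter_congr (fun a _ => hP a) ▸ rfl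
  rw [hcols, foldAll_eq, shift_spec]
  apply List.map_congr_left
  intro p _
  cases p with
  | nil => rw [step1_nil]
  | cons x rest =>
      rw [step1_cons]
      set cs := (List.range w).filter (pvColEmptyAll lines) with hcs
      have hpw : cs.Pairwise (fun a b => a < b) :=
        List.Pairwise.sublist List.filter_sublist List.pairwise_lt_range
      rw [runV_eq cs hpw x 0]
      congr 1
      have hgetD : ∀ j : Nat, j ≤ w →
          (((List.range (w + 1)).map (fun j => 999999 * (((List.range j).filter (pvColEmptyAll lines)).length : Int))).getD j 0)
            = 999999 * (((List.range j).filter (pvColEmptyAll lines)).length : Int) := by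
        intro j hj
        rw [List.getD_eq_getElem?_getD, List.getElem?_map, List.getElem?_range (by omega)]
        rfl
      by_cases h1 : x > (w : Int)
      · rw [if_pos h1, hgetD w le_rfl]
        have : cs.countP (fun c : Nat => decide ((c : Int) < x - 0)) = cs.length := by
          rw [List.countP_eq_length]
          intro a ha
          have : a < w := List.mem_range.mp (List.mem_of_mem_filter ha)
          simp only [decide_eq_true_eq]; omega
        rw [this, hcs]
      · rw [if_neg h1]
        by_cases h2 : x > 0
        · rw [if_pos h2, hgetD x.toNat (by omega)]
          congr 1
          have : cs.countP (fun c : Nat => decide ((c : Int) < x - 0))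
              = cs.countP (fun c => decide (c < x.toNat)) := by
            apply List.countP_congr
            intro a _
            have hax : ((a : Int) < x - 0) ↔ (a < x.toNat) := by omega
            simp [hax]
          rw [this, hcs, countP_filter_range w x.toNat (pvColEmptyAll lines) (by omega)]
        · rw [if_neg h2]
          have : cs.countP (fun c : Nat => decide ((c : Int) < x - 0)) = 0 := by
            rw [List.countP_eq_zero]
            intro a _
            simp only [decide_eq_true_eq]
            omega
          rw [this]
          norm_num
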